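-- pv_equiv track=rewrite | github.com/pathakshashank17/EE392-EE491 | Galois Counter Mode/GCM.py | matrixToblocks
-- ===== SOURCE A (Python) =====
-- def matrixToblocks(matrix):
--     flat_matrix = [item for sublist in matrix for item in sublist]
--     size = len(flat_matrix)
--     res = []
--     for i in range(int(size/16)):
--         res.append(flat_matrix[i*16:(i+1)*16])
--
--     diff = size % 16
--     lst = flat_matrix[int(size/16)*16:]
--
--     if diff != 0:
--         res.append(lst)
--     return res
-- ===== SOURCE B (Python) =====
-- def matrixToblocks(matrix):
--     res = []
--     current = []
--     for sublist in matrix: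
--         for item in sublist:
--             current.append(item)
--             if len(current) == 16:
--                 res.append(current)
--                 current = []
--     if current:
--         res.append(current)
--     return res
-- ===== Notes on version B (the rewrite author's own statement) =====
-- stated objective: alternative
-- what changed: Streams over the nested elements with a running 16-element buffer that is flushed when full, instead of building an intermediate flat list and slicing it by index arithmetic.
import Mathlib
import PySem

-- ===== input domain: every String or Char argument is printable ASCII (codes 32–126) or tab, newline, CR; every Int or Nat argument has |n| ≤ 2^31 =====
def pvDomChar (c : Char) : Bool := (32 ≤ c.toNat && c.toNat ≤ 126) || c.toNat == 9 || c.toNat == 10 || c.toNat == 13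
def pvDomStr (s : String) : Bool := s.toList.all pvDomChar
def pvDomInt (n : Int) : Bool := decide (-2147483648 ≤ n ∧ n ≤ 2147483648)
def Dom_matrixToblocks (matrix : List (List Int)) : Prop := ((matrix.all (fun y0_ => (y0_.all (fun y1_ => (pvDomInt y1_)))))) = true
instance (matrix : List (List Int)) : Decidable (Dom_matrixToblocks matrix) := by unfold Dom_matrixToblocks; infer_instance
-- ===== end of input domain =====

-- B streams the nested elements through a running 16-element buffer flushed when full,
-- instead of A's intermediate flat list sliced by index arithmetic (objective: alternative).

-- ===== PORT A =====
def matrixToblocks (matrix : List (List Int)) : List (List Int) :=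
  let flat_matrix := matrix.flatMap (fun sublist => sublist)
  let size := flat_matrix.length
  let res := (List.range (size / 16)).foldl
    (fun res (i : Nat) =>
      res ++ [PySem.List.slice flat_matrix (some ((i : Int) * 16)) (some (((i : Int) + 1) * 16))]) []
  let diff := size % 16
  let lst := PySem.List.slice flat_matrix (some (((size / 16 : Nat) : Int) * 16)) none
  if diff ≠ 0 then res ++ [lst] else res

-- ===== PORT B =====
def matrixToblocks_alt (matrix : List (List Int)) : List (List Int) :=
  let p := matrix.foldl
    (fun (st : List (List Int) × List Int) sublist =>
      sublist.foldl
        (fun (st : List (List Int) × List Int) item =>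
          let current := st.2 ++ [item]
          if current.length = 16 then (st.1 ++ [current], []) else (st.1, current)) st)
    ([], [])
  if p.2 ≠ [] then p.1 ++ [p.2] else p.1

-- ===== PRECONDITION & SPEC =====
def Spec_matrixToblocks (matrix : List (List Int)) (out : List (List Int)) : Prop := out = matrixToblocks_alt matrix
instance (matrix : List (List Int)) (out : List (List Int)) : Decidable (Spec_matrixToblocks matrix out) := by unfold Spec_matrixToblocks; infer_instance

-- ===== CLAIM (what is proved, stated in full; the proofs are below) =====
def Claim_equal_matrixToblocks : Prop := ∀ (matrix : List (List Int)), Dom_matrixToblocks matrix → Spec_matrixToblocks matrix (matrixToblocks matrix)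

-- ===== LEMMAS AND PROOFS =====

-- the common characterisation: successive 16-element chunks, last one possibly short
def chunk16 (l : List Int) : List (List Int) :=
  if l = [] then [] else l.take 16 :: chunk16 (l.drop 16)
termination_by l.length
decreasing_by
  rename_i h
  have : 0 < l.length := List.length_pos_iff.mpr h
  simp [List.length_drop]; omega

theorem foldl_snoc_map (f : Nat → List Int) (l : List Nat) (init : List (List Int)) :
    l.foldl (fun r i => r ++ [f i]) init = init ++ l.map f := by
  induction l generalizing init with
  | nil => simp
  | cons x t ih => simp [List.foldl_cons, ih, List.append_assoc]

-- A's loop as map-over-range, then equal to chunk16, by strong induction on the length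
theorem chunk16_eq (l : List Int) :
    (List.range (l.length / 16)).map (fun i => (l.drop (i * 16)).take 16) ++
      (if l.length % 16 ≠ 0 then [l.drop ((l.length / 16) * 16)] else []) = chunk16 l := by
  by_cases h16 : l.length < 16
  · have hdiv : l.length / 16 = 0 := Nat.div_eq_of_lt h16
    have hmod : l.length % 16 = l.length := Nat.mod_eq_of_lt h16
    rw [chunk16]
    by_cases hnil : l = []
    · simp [hnil]
    · have hlen : l.length ≠ 0 := by simpa [List.length_eq_zero_iff] using hnil
      have hd : l.drop 16 = [] := List.drop_eq_nil_of_le (le_of_lt h16)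
      simp [hdiv, hmod, hnil, hlen, List.take_of_length_le (le_of_lt h16), hd, chunk16]
  · rw [not_lt] at h16
    have hne : l ≠ [] := by rintro rfl; simp at h16
    rw [chunk16, if_neg hne]
    have ih := chunk16_eq (l.drop 16)
    have hlen : (l.drop 16).length = l.length - 16 := by simp
    have hdiv : (l.length - 16) / 16 = l.length / 16 - 1 := by omega
    have hdivpos : 0 < l.length / 16 := by
      have := Nat.le_div_iff_mul_le (by norm_num : 0 < 16) |>.mpr (by omega : 1 * 16 ≤ l.length)
      omega
    have hmod : (l.length - 16) % 16 = l.length % 16 := by omega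
    rw [hlen, hdiv, hmod] at ih
    obtain ⟨m, hm⟩ : ∃ m, l.length / 16 = m + 1 := ⟨l.length / 16 - 1, by omega⟩
    rw [hm]
    rw [hm] at ih; simp only [Nat.add_sub_cancel] at ih
    rw [List.range_succ_eq_map]
    simp only [List.map_cons, List.map_map]
    have hdropdrop : ∀ k : Nat, (l.drop 16).drop k = l.drop (16 + k) := by
      intro k; rw [List.drop_drop]
    have hmapeq : (List.range m).map ((fun i => (l.drop (i * 16)).take 16) ∘ Nat.succ)
        = (List.range m).map (fun i => ((l.drop 16).drop (i * 16)).take 16) := by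
      apply List.map_congr_left; intro i _
      show (l.drop (Nat.succ i * 16)).take 16 = ((l.drop 16).drop (i * 16)).take 16
      rw [hdropdrop]
      have : Nat.succ i * 16 = 16 + i * 16 := by omega
      rw [this]
    have htail : l.drop ((m + 1) * 16) = (l.drop 16).drop (m * 16) := by
      rw [hdropdrop]
      have : (m + 1) * 16 = 16 + m * 16 := by omega
      rw [this]
    rw [hmapeq, htail]
    simp only [Nat.zero_mul, List.drop_zero, List.cons_append]
    rw [ih]
termination_by l.length
decreasing_by
  have : 0 < l.length := List.length_pos_iff.mpr hne
  simp [List.length_drop]; omega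

-- B's step and finalisation
def bstep (st : List (List Int) × List Int) (item : Int) : List (List Int) × List Int :=
  if (st.2 ++ [item]).length = 16 then (st.1 ++ [st.2 ++ [item]], []) else (st.1, st.2 ++ [item])

def bfin (p : List (List Int) × List Int) : List (List Int) :=
  if p.2 ≠ [] then p.1 ++ [p.2] else p.1

theorem bfold_invariant (l : List Int) (res : List (List Int)) (cur : List Int)
    (hcur : cur.length < 16) :
    bfin (l.foldl bstep (res, cur)) = res ++ chunk16 (cur ++ l) := by
  induction l generalizing res cur with
  | nil =>
    rw [chunk16]
    by_cases h : cur = []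
    · simp [h, bfin]
    · simp [h, bfin, List.take_of_length_le (le_of_lt hcur),
        List.drop_eq_nil_of_le (le_of_lt hcur), chunk16]
  | cons x t ih =>
    simp only [List.foldl_cons]
    by_cases hfull : (cur ++ [x]).length = 16
    · have hstep : bstep (res, cur) x = (res ++ [cur ++ [x]], []) := by
        unfold bstep; rw [if_pos hfull]
      rw [hstep, ih (res ++ [cur ++ [x]]) [] (by norm_num)]
      have hassoc : cur ++ x :: t = (cur ++ [x]) ++ t := by simp
      have hch : chunk16 (cur ++ x :: t) = (cur ++ [x]) :: chunk16 t := by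
        rw [hassoc, chunk16, if_neg (by simp)]
        simp at hfull
        rw [List.take_append_of_le_length (by simp; omega),
          List.drop_append_of_le_length (by simp; omega)]
        rw [List.take_of_length_le (by simp; omega), List.drop_eq_nil_of_le (by simp; omega)]
        simp
      rw [hch]; simp
    · have hstep : bstep (res, cur) x = (res, cur ++ [x]) := by
        unfold bstep; rw [if_neg hfull]
      have hlt : (cur ++ [x]).length < 16 := by
        simp at hfull ⊢; omega
      rw [hstep, ih res (cur ++ [x]) hlt]
      congr 1; congr 1; simp

theorem foldl_foldl_flatMap (ms : List (List Int)) (init : List (List Int) × List Int) :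
    ms.foldl (fun st sub => sub.foldl bstep st) init = (ms.flatMap (fun s => s)).foldl bstep init := by
  induction ms generalizing init with
  | nil => rfl
  | cons s t ih =>
    simp only [List.foldl_cons, List.flatMap_cons, List.foldl_append]
    exact ih _

theorem matrixToblocks_alt_eq (matrix : List (List Int)) :
    matrixToblocks_alt matrix = chunk16 (matrix.flatMap (fun s => s)) := by
  show bfin (matrix.foldl (fun st sublist => sublist.foldl bstep st) ([], [])) = _
  rw [foldl_foldl_flatMap, bfold_invariant _ [] [] (by norm_num)]
  simp

theorem matrixToblocks_eq (matrix : List (List Int)) :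
    matrixToblocks matrix = chunk16 (matrix.flatMap (fun s => s)) := by
  unfold matrixToblocks
  set l := matrix.flatMap (fun s => s) with hl
  simp only
  rw [foldl_snoc_map (fun i => PySem.List.slice l (some ((i : Int) * 16)) (some (((i : Int) + 1) * 16)))]
  have hmap : (List.range (l.length / 16)).map
      (fun (i : Nat) => PySem.List.slice l (some ((i : Int) * 16)) (some (((i : Int) + 1) * 16)))
      = (List.range (l.length / 16)).map (fun i => (l.drop (i * 16)).take 16) := by
    apply List.map_congr_left; intro i _
    have h1 : ((i : Int) * 16) = ((i * 16 : Nat) : Int) := by push_cast; ring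
    have h2 : (((i : Int) + 1) * 16) = (((i + 1) * 16 : Nat) : Int) := by push_cast; ring
    rw [h1, h2, PySem.List.slice_natCast]
    congr 1; omega
  have htail : PySem.List.slice l (some (((l.length / 16 : Nat) : Int) * 16)) none
      = l.drop ((l.length / 16) * 16) := by
    have h1 : (((l.length / 16 : Nat) : Int) * 16) = (((l.length / 16) * 16 : Nat) : Int) := by
      push_cast; ring
    rw [h1, PySem.List.slice_from_natCast]
  rw [hmap, htail, ← chunk16_eq l]
  by_cases h : l.length % 16 = 0
  · simp [h]
  · simp [h]

-- ===== VERDICT (by name: the statement is the Claim_ definition above) =====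
theorem matrixToblocks_spec : Claim_equal_matrixToblocks := by
  intro matrix _
  show matrixToblocks matrix = matrixToblocks_alt matrix
  rw [matrixToblocks_eq, matrixToblocks_alt_eq]
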